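-- pv_equiv track=rewrite | github.com/HaveMindMedia/Dorabella | dorabella_waltz_Emajor_polyphonic_v1.0_03-17-2026.py | analyze_harmony
-- ===== SOURCE A (Python) =====
-- def analyze_harmony(pitches):
--     pitch_set = set(p % 12 for p in pitches)
--     chord_pcs = {
--         'E':   {4, 8, 11},
--         'F#m': {6, 9, 1},
--         'G#m': {8, 11, 3},
--         'A':   {9, 1, 4},
--         'B':   {11, 3, 6},
--         'C#m': {1, 4, 8},
--         'B7':  {11, 3, 6, 9},
--     }
--     best, best_s = 'E', -1
--     for name, pcs in chord_pcs.items():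
--         s = len(pitch_set & pcs)
--         if s > best_s:
--             best_s = s
--             best = name
--     return best
-- ===== SOURCE B (Python) =====
-- def analyze_harmony(pitches):
--     chord_pcs = {
--         'E':   {4, 8, 11},
--         'F#m': {6, 9, 1},
--         'G#m': {8, 11, 3},
--         'A':   {9, 1, 4},
--         'B':   {11, 3, 6},
--         'C#m': {1, 4, 8},
--         'B7':  {11, 3, 6, 9},
--     }
--     # inverted index: pitch class -> chords containing it
--     pc_to_chords = {pc: [name for name, pcs in chord_pcs.items() if pc in pcs]
--                     for pc in range(12)}
--     counts = {}
--     for pc in set(p % 12 for p in pitches):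
--         for name in pc_to_chords[pc]:
--             counts[name] = counts.get(name, 0) + 1
--     best, best_s = 'E', -1
--     for name in chord_pcs:
--         s = counts.get(name, 0)
--         if s > best_s:
--             best_s = s
--             best = name
--     return best
-- ===== Notes on version B (the rewrite author's own statement) =====
-- stated objective: alternative
-- what changed: Replaces per-chord set intersections with an inverted pitch-class-to-chords index and a single voting pass over the distinct pitch classes, then selects the first maximal chord from the vote counts.
import Mathlib
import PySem

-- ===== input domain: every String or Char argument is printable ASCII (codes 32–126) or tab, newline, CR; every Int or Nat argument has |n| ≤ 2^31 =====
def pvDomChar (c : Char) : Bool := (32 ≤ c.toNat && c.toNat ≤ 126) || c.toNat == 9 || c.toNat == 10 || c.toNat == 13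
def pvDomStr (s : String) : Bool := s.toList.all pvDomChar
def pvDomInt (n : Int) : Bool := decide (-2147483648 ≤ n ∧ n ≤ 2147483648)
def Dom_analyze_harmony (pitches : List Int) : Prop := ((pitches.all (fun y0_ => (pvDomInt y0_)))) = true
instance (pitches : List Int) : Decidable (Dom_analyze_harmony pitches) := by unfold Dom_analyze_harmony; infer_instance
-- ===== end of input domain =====

-- B replaces per-chord set intersections with an inverted pitch-class→chords index and one
-- voting pass over the distinct pitch classes (objective: alternative decomposition, same cost).

-- ===== PORT A =====
-- the chord_pcs dict (identical literal in A and in Source B), as an ordered list of (name, pitch-class set)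
def pvChordsA : List (String × PySem.Set Int) :=
  [("E",   PySem.Set.ofList [4, 8, 11]),
   ("F#m", PySem.Set.ofList [6, 9, 1]),
   ("G#m", PySem.Set.ofList [8, 11, 3]),
   ("A",   PySem.Set.ofList [9, 1, 4]),
   ("B",   PySem.Set.ofList [11, 3, 6]),
   ("C#m", PySem.Set.ofList [1, 4, 8]),
   ("B7",  PySem.Set.ofList [11, 3, 6, 9])]

def analyze_harmony (pitches : List Int) : String :=
  let pitch_set : PySem.Set Int := PySem.Set.ofList (pitches.map (fun p => PySem.Int.mod p 12))
  let r := pvChordsA.foldl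
    (fun (acc : String × Int) nv =>
      let s : Int := PySem.Set.len (PySem.Set.inter pitch_set nv.2)
      if s > acc.2 then (nv.1, s) else acc)
    ("E", -1)
  r.1

-- ===== PORT B =====
-- pc_to_chords = {pc: [name for name, pcs in chord_pcs.items() if pc in pcs] for pc in range(12)}
def pvPcToChords : PySem.Dict Int (List String) :=
  PySem.Dict.ofList ((PySem.List.pyRange 0 12 1).map (fun pc =>
    (pc, (pvChordsA.filter (fun nv => PySem.Set.contains nv.2 pc)).map (fun nv => nv.1))))

def analyze_harmony_alt (pitches : List Int) : String :=
  let pcs : PySem.Set Int := PySem.Set.ofList (pitches.map (fun p => PySem.Int.mod p 12))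
  let counts : PySem.Dict String Int :=
    pcs.foldl
      (fun d pc =>
        (pvPcToChords.getD pc []).foldl (fun d name => d.insert name (d.getD name 0 + 1)) d)
      PySem.Dict.empty
  let r := (pvChordsA.map (fun nv => nv.1)).foldl
    (fun (acc : String × Int) name =>
      let s : Int := counts.getD name 0
      if s > acc.2 then (name, s) else acc)
    ("E", -1)
  r.1

-- ===== PRECONDITION & SPEC =====
def Spec_analyze_harmony (pitches : List Int) (out : String) : Prop := out = analyze_harmony_alt pitches
instance (pitches : List Int) (out : String) : Decidable (Spec_analyze_harmony pitches out) := by unfold Spec_analyze_harmony; infer_instance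

-- ===== CLAIM (what is proved, stated in full; the proofs are below) =====
def Claim_equal_analyze_harmony : Prop := ∀ (pitches : List Int), Dom_analyze_harmony pitches → Spec_analyze_harmony pitches (analyze_harmony pitches)

-- ===== LEMMAS AND PROOFS =====

-- the counts dict of B, as a function of the distinct pitch-class list
def pvCounts (S : List Int) : PySem.Dict String Int :=
  S.foldl
    (fun d pc =>
      (pvPcToChords.getD pc []).foldl (fun d name => d.insert name (d.getD name 0 + 1)) d)
    PySem.Dict.empty

lemma pvCounts_getD (S : List Int) (d : PySem.Dict String Int) (c : String) :
    (S.foldl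
      (fun d pc =>
        (pvPcToChords.getD pc []).foldl (fun d name => d.insert name (d.getD name 0 + 1)) d)
      d).getD c 0
    = d.getD c 0 + (S.map (fun pc => ((pvPcToChords.getD pc []).count c : Int))).sum := by
  induction S generalizing d with
  | nil => simp
  | cons pc S ih =>
      simp only [List.foldl_cons, List.map_cons, List.sum_cons, ih,
        PySem.Dict.getD_foldl_insert_add_one]
      ring

-- per pitch class in [0,12): the vote a chord of the table receives is membership of pc in its set
lemma pvVote_eq (pc : Int) (h0 : 0 ≤ pc) (h12 : pc < 12) (nv : String × PySem.Set Int)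
    (hnv : nv ∈ pvChordsA) :
    ((pvPcToChords.getD pc []).count nv.1 : Int)
      = if PySem.Set.contains nv.2 pc then 1 else 0 := by
  fin_cases hnv <;> interval_cases pc <;> decide

lemma pvScore_eq (S : List Int) (hS : ∀ pc ∈ S, 0 ≤ pc ∧ pc < 12)
    (nv : String × PySem.Set Int) (hnv : nv ∈ pvChordsA) :
    (pvCounts S).getD nv.1 0 = PySem.Set.len (PySem.Set.inter S nv.2) := by
  unfold pvCounts
  rw [pvCounts_getD]
  have hmap : S.map (fun pc => ((pvPcToChords.getD pc []).count nv.1 : Int))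
      = S.map (fun pc => if PySem.Set.contains nv.2 pc then (1 : Int) else 0) := by
    apply List.map_congr_left
    intro pc hpc
    exact pvVote_eq pc (hS pc hpc).1 (hS pc hpc).2 nv hnv
  rw [hmap, PySem.List.sum_map_ite_one_zero]
  simp only [PySem.Set.len, PySem.Set.inter, List.countP_eq_length_filter,
    PySem.Dict.getD_empty, zero_add]

lemma pvPitchSet_bounds (pitches : List Int) :
    ∀ pc ∈ PySem.Set.ofList (pitches.map (fun p => PySem.Int.mod p 12)), 0 ≤ pc ∧ pc < 12 := by
  intro pc hpc
  rw [PySem.Set.mem_ofList, List.mem_map] at hpc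
  obtain ⟨p, _, rfl⟩ := hpc
  exact ⟨PySem.Int.mod_nonneg p (by norm_num), PySem.Int.mod_lt p (by norm_num)⟩

-- ===== VERDICT (by name: the statement is the Claim_ definition above) =====
theorem analyze_harmony_spec : Claim_equal_analyze_harmony := by
  intro pitches _
  unfold Spec_analyze_harmony analyze_harmony analyze_harmony_alt
  set S : List Int := PySem.Set.ofList (pitches.map (fun p => PySem.Int.mod p 12)) with hSdef
  have hS := pvPitchSet_bounds pitches
  rw [← hSdef] at hS
  have hsc : ∀ nv ∈ pvChordsA,
      (pvCounts S).getD nv.1 0 = PySem.Set.len (PySem.Set.inter S nv.2) :=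
    fun nv hnv => pvScore_eq S hS nv hnv
  have h1 := hsc ("E",   PySem.Set.ofList [4, 8, 11]) (by simp [pvChordsA])
  have h2 := hsc ("F#m", PySem.Set.ofList [6, 9, 1]) (by simp [pvChordsA])
  have h3 := hsc ("G#m", PySem.Set.ofList [8, 11, 3]) (by simp [pvChordsA])
  have h4 := hsc ("A",   PySem.Set.ofList [9, 1, 4]) (by simp [pvChordsA])
  have h5 := hsc ("B",   PySem.Set.ofList [11, 3, 6]) (by simp [pvChordsA])
  have h6 := hsc ("C#m", PySem.Set.ofList [1, 4, 8]) (by simp [pvChordsA])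
  have h7 := hsc ("B7",  PySem.Set.ofList [11, 3, 6, 9]) (by simp [pvChordsA])
  simp only [pvChordsA, pvChordsA, pvCounts] at *
  simp only [List.map_cons, List.map_nil, List.foldl_cons, List.foldl_nil]
  rw [← h1, ← h2, ← h3, ← h4, ← h5, ← h6, ← h7]
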